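-- pv_equiv track=rewrite | github.com/sed-szeged/hcg-js-framework | util/compare-callchain3.py | find_common_chains
-- ===== SOURCE A (Python) =====
-- def find_common_chains(json_data1, json_data2, json_data3):
--     call_chains1 = set()
--     for call_chain in json_data1["call_chains"]:
--         call_chains1.add(tuple(call_chain))
--
--     call_chains2 = set()
--     for call_chain in json_data2["call_chains"]:
--         call_chain_tuple = tuple(call_chain)
--         if call_chain_tuple in call_chains1:
--             call_chains2.add(call_chain_tuple)
--
--     call_chains1 = set()
--     for call_chain in json_data3["call_chains"]:
--         call_chain_tuple = tuple(call_chain)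
--         if call_chain_tuple in call_chains2:
--             call_chains1.add(call_chain_tuple)
--
--     return call_chains1
-- ===== SOURCE B (Python) =====
-- def find_common_chains(json_data1, json_data2, json_data3):
--     counter = {}
--     for json_data in (json_data1, json_data2, json_data3):
--         for chain in {tuple(c) for c in json_data["call_chains"]}:
--             counter[chain] = counter.get(chain, 0) + 1
--     return {tuple(c) for c in json_data3["call_chains"] if counter[tuple(c)] == 3}
-- ===== Notes on version B (the rewrite author's own statement) =====
-- stated objective: alternative
-- what changed: Replaces A's progressive set-intersection filtering (each pass shrinking a carried-over set) by a frequency table: each dataset's deduplicated chains are tallied into one shared counter over three symmetric passes, and the chains tallied three times are returned.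
import Mathlib
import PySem

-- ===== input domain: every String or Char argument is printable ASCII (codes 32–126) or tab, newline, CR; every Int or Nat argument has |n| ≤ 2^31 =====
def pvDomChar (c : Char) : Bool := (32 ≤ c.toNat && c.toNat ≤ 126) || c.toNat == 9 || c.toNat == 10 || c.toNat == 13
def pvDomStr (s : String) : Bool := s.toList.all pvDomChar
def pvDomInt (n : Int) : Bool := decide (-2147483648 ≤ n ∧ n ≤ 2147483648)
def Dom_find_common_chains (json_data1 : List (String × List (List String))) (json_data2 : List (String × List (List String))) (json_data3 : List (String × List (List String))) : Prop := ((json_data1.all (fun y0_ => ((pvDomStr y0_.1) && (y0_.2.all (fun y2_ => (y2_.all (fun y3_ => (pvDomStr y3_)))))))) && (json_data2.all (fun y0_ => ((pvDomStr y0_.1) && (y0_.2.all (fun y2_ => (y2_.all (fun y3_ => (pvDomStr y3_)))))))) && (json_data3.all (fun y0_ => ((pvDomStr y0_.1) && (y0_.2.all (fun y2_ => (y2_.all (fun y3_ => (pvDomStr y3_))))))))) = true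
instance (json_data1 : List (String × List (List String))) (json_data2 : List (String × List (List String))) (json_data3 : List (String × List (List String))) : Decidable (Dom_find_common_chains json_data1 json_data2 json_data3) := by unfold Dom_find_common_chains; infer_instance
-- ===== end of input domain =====

-- B replaces A's progressive set-intersection filtering by one shared frequency table over
-- three symmetric deduplicated passes ("objective": alternative); equal return value is proved on
-- Pre_ (all three dicts carry the "call_chains" key — Python raises KeyError otherwise).

-- shared helper: d["call_chains"] as a total function (first-match association-list lookup;
-- Pre_ guarantees the key is present, so the [] default is never used on admitted inputs)
def pvChains (d : List (String × List (List String))) : List (List String) :=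
  (d.lookup "call_chains").getD []

-- ===== PORT A =====
def find_common_chains (json_data1 : List (String × List (List String))) (json_data2 : List (String × List (List String))) (json_data3 : List (String × List (List String))) : List (List String) :=
  -- call_chains1 = set(); for call_chain in json_data1["call_chains"]: call_chains1.add(tuple(call_chain))
  let call_chains1 : PySem.Set (List String) :=
    (pvChains json_data1).foldl (fun s c => PySem.Set.add s c) PySem.Set.empty
  -- call_chains2 = set(); filter json_data2's chains by membership in call_chains1
  let call_chains2 : PySem.Set (List String) :=
    (pvChains json_data2).foldl
      (fun s c => if PySem.Set.contains call_chains1 c then PySem.Set.add s c else s)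
      PySem.Set.empty
  -- call_chains1 = set(); filter json_data3's chains by membership in call_chains2
  let call_chains1' : PySem.Set (List String) :=
    (pvChains json_data3).foldl
      (fun s c => if PySem.Set.contains call_chains2 c then PySem.Set.add s c else s)
      PySem.Set.empty
  call_chains1'

-- ===== PORT B =====
def find_common_chains_alt (json_data1 : List (String × List (List String))) (json_data2 : List (String × List (List String))) (json_data3 : List (String × List (List String))) : List (List String) :=
  -- counter = {}; for json_data in (d1,d2,d3): for chain in {tuple(c) for c in json_data["call_chains"]}: counter[chain] = counter.get(chain,0)+1
  let counter : PySem.Dict (List String) Int :=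
    [json_data1, json_data2, json_data3].foldl
      (fun d data =>
        (PySem.Set.ofList (pvChains data)).foldl
          (fun d t => d.insert t (d.getD t 0 + 1)) d)
      PySem.Dict.empty
  -- return {tuple(c) for c in json_data3["call_chains"] if counter[tuple(c)] == 3}
  -- (counter[t]: the key is always present here — every chain of json_data3 was tallied — so getD is exact)
  (pvChains json_data3).foldl
    (fun s c => if counter.getD c 0 == 3 then PySem.Set.add s c else s)
    PySem.Set.empty

-- ===== PRECONDITION & SPEC =====
-- Pre_ excludes exactly the inputs where a dict lacks the "call_chains" key: there Python A raises KeyError.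
def Pre_find_common_chains (json_data1 : List (String × List (List String))) (json_data2 : List (String × List (List String))) (json_data3 : List (String × List (List String))) : Prop :=
  (json_data1.lookup "call_chains").isSome = true ∧
  (json_data2.lookup "call_chains").isSome = true ∧
  (json_data3.lookup "call_chains").isSome = true
instance (json_data1 : List (String × List (List String))) (json_data2 : List (String × List (List String))) (json_data3 : List (String × List (List String))) : Decidable (Pre_find_common_chains json_data1 json_data2 json_data3) := by unfold Pre_find_common_chains; infer_instance

def pvWitness_find_common_chains : (List (String × List (List String))) × (List (String × List (List String))) × (List (String × List (List String))) :=
  ([("call_chains", [["f", "g"]])], [("call_chains", [["f", "g"]])], [("call_chains", [["f", "g"], ["h"]])])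

def Spec_find_common_chains (json_data1 : List (String × List (List String))) (json_data2 : List (String × List (List String))) (json_data3 : List (String × List (List String))) (out : List (List String)) : Prop := out = find_common_chains_alt json_data1 json_data2 json_data3
instance (json_data1 : List (String × List (List String))) (json_data2 : List (String × List (List String))) (json_data3 : List (String × List (List String))) (out : List (List String)) : Decidable (Spec_find_common_chains json_data1 json_data2 json_data3 out) := by unfold Spec_find_common_chains; infer_instance

-- ===== CLAIM (what is proved, stated in full; the proofs are below) =====
def Claim_equal_find_common_chains : Prop := ∀ (json_data1 : List (String × List (List String))) (json_data2 : List (String × List (List String))) (json_data3 : List (String × List (List String))), Dom_find_common_chains json_data1 json_data2 json_data3 → Pre_find_common_chains json_data1 json_data2 json_data3 → Spec_find_common_chains json_data1 json_data2 json_data3 (find_common_chains json_data1 json_data2 json_data3)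

-- ===== LEMMAS AND PROOFS =====

-- membership in a "filter by p, add to set" fold (the shape of A's 2nd/3rd loops and B's last loop)
theorem mem_foldl_filter_add (p : List String → Bool) (l : List (List String))
    (s0 : PySem.Set (List String)) (x : List String) :
    x ∈ l.foldl (fun s c => if p c then PySem.Set.add s c else s) s0 ↔
      x ∈ s0 ∨ (x ∈ l ∧ p x = true) := by
  induction l generalizing s0 with
  | nil => simp
  | cons a t ih =>
    simp only [List.foldl_cons, ih, List.mem_cons]
    by_cases hp : p a
    · simp only [hp, if_pos, PySem.Set.mem_add]
      constructor
      · rintro (⟨h | rfl⟩ | ⟨hx, hpx⟩)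
        · exact Or.inl h
        · exact Or.inr ⟨Or.inl rfl, hp⟩
        · exact Or.inr ⟨Or.inr hx, hpx⟩
      · rintro (h | ⟨(rfl | hx), hpx⟩)
        · exact Or.inl (Or.inl h)
        · exact Or.inl (Or.inr rfl)
        · exact Or.inr ⟨hx, hpx⟩
    · simp only [hp, Bool.false_eq_true, if_false]
      constructor
      · rintro (h | ⟨hx, hpx⟩)
        · exact Or.inl h
        · exact Or.inr ⟨Or.inr hx, hpx⟩
      · rintro (h | ⟨(rfl | hx), hpx⟩)
        · exact Or.inl h
        · exact absurd hpx (by simpa using hp)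
        · exact Or.inr ⟨hx, hpx⟩

-- count of x in set(l) is 1 or 0 according to membership in l
theorem count_ofList (l : List (List String)) (x : List String) :
    (PySem.Set.ofList l).count x = if x ∈ l then 1 else 0 := by
  by_cases h : x ∈ l
  · have hm : x ∈ PySem.Set.ofList l := (PySem.Set.mem_ofList l x).mpr h
    have hnd := PySem.Set.nodup_ofList l
    have h1 : (PySem.Set.ofList l).count x ≤ 1 := List.nodup_iff_count_le_one.mp hnd x
    have h2 : 0 < (PySem.Set.ofList l).count x := List.count_pos_iff.mpr hm
    simp only [h, if_true]
    omega
  · simp only [h, if_false, List.count_eq_zero]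
    intro hm
    exact h ((PySem.Set.mem_ofList l x).mp hm)

-- B's counter value at c: the number of datasets whose chain list contains c
theorem counter_getD (L1 L2 L3 : List (List String)) (c : List String) :
    ((PySem.Set.ofList L3).foldl (fun d t => d.insert t (d.getD t 0 + 1))
      ((PySem.Set.ofList L2).foldl (fun d t => d.insert t (d.getD t 0 + 1))
        ((PySem.Set.ofList L1).foldl (fun d t => d.insert t (d.getD t 0 + 1))
          (PySem.Dict.empty : PySem.Dict (List String) Int)))).getD c 0
    = (if c ∈ L1 then (1 : Int) else 0) + (if c ∈ L2 then 1 else 0) + (if c ∈ L3 then 1 else 0) := by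
  simp only [PySem.Dict.getD_foldl_insert_add_one, count_ofList]
  simp only [PySem.Dict.getD, PySem.Dict.get?, PySem.Dict.empty, List.find?_nil]
  split_ifs <;> norm_num

-- membership in A's first loop (plain set-building fold)
theorem mem_foldl_add (l : List (List String)) (s0 : PySem.Set (List String)) (x : List String) :
    x ∈ l.foldl (fun s c => PySem.Set.add s c) s0 ↔ x ∈ s0 ∨ x ∈ l := by
  induction l generalizing s0 with
  | nil => simp
  | cons a t ih =>
    simp only [List.foldl_cons, ih, PySem.Set.mem_add, List.mem_cons]
    tauto

-- ===== VERDICT (by name: the statement is the Claim_ definition above) =====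
theorem find_common_chains_spec : Claim_equal_find_common_chains := by
  intro j1 j2 j3 _ _
  show find_common_chains j1 j2 j3 = find_common_chains_alt j1 j2 j3
  unfold find_common_chains find_common_chains_alt
  simp only [List.foldl_cons, List.foldl_nil]
  apply PySem.List.foldl_congr_mem
  intro acc c hc
  have hmem2 : ∀ x, (PySem.Set.contains
      ((pvChains j2).foldl
        (fun s c => if PySem.Set.contains
            ((pvChains j1).foldl (fun s c => PySem.Set.add s c) PySem.Set.empty) c
          then PySem.Set.add s c else s)
        PySem.Set.empty) x) = true ↔ x ∈ pvChains j2 ∧ x ∈ pvChains j1 := by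
    intro x
    rw [PySem.Set.contains_iff, mem_foldl_filter_add]
    simp only [PySem.Set.empty, List.not_mem_nil, false_or, PySem.Set.contains_iff,
      mem_foldl_add]
  have hcond : (PySem.Set.contains
      ((pvChains j2).foldl
        (fun s c => if PySem.Set.contains
            ((pvChains j1).foldl (fun s c => PySem.Set.add s c) PySem.Set.empty) c
          then PySem.Set.add s c else s)
        PySem.Set.empty) c)
      = (((PySem.Set.ofList (pvChains j3)).foldl (fun d t => d.insert t (d.getD t 0 + 1))
          ((PySem.Set.ofList (pvChains j2)).foldl (fun d t => d.insert t (d.getD t 0 + 1))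
            ((PySem.Set.ofList (pvChains j1)).foldl (fun d t => d.insert t (d.getD t 0 + 1))
              (PySem.Dict.empty : PySem.Dict (List String) Int)))).getD c 0 == 3) := by
    rw [counter_getD, Bool.eq_iff_iff, hmem2 c, beq_iff_eq]
    by_cases h1 : c ∈ pvChains j1 <;> by_cases h2 : c ∈ pvChains j2 <;>
      norm_num [h1, h2, hc]
  rw [hcond]
  split <;> rfl
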